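-- pv_equiv track=rewrite | github.com/Kacperon/Projekty | ASD/1etap/cw/cw.py | zamiana
-- ===== SOURCE A (Python) =====
-- def zamiana(T,a,b):
--     n=len(T)
--     if a>b:
--         i=find(T,a)
--         while i>0 and T[i-1]>b:
--             T[i]=T[i-1]
--             i-=1
--         T[i]=b
--     else:
--         i=find(T,a)
--         while i<n-1 and T[i+1]<b:
--             T[i]=T[i+1]
--             i+=1
--         T[i]=b
--     return T
--
-- def find(T, a):
--     n = len(T)
--     left = 0
--     right = n - 1
--     if a<T[0]:
--         return 0
--     while left <= right:
--         mid = left + (right - left) // 2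
--         if T[mid] == a:
--             return mid
--         elif T[mid] < a:
--             left = mid + 1
--         else:
--             right = mid - 1
--     if T[mid]>a:
--         mid-=1
--     return mid
-- ===== SOURCE B (Python) =====
-- def zamiana(T, a, b):
--     # Computes the insertion boundary with next() over an index range and rebuilds the
--     # result by slicing; returns a fresh list (A shifts elements inside T and returns T).
--     i = find(T, a)
--     if a > b:
--         j = next((p for p in range(i, 0, -1) if T[p - 1] <= b), 0)
--         return T[:j] + [b] + T[j:i] + T[i + 1:]
--     else:
--         j = next((p for p in range(i, len(T) - 1) if T[p + 1] >= b), len(T) - 1)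
--         return T[:i] + T[i + 1:j + 1] + [b] + T[j + 1:]
--
-- def find(T, a):
--     n = len(T)
--     left = 0
--     right = n - 1
--     if a < T[0]:
--         return 0
--     while left <= right:
--         mid = left + (right - left) // 2
--         if T[mid] == a:
--             return mid
--         elif T[mid] < a:
--             left = mid + 1
--         else:
--             right = mid - 1
--     if T[mid] > a:
--         mid -= 1
--     return mid
-- ===== Notes on version B (the rewrite author's own statement) =====
-- stated objective: alternative
-- what changed: B keeps A's binary-search find but replaces A's two destructive element-shifting while-loops with computing the insertion boundary via next() over an index range and rebuilding the result by list slicing (B returns a fresh list; A mutates T in place and returns it).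
import Mathlib
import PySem

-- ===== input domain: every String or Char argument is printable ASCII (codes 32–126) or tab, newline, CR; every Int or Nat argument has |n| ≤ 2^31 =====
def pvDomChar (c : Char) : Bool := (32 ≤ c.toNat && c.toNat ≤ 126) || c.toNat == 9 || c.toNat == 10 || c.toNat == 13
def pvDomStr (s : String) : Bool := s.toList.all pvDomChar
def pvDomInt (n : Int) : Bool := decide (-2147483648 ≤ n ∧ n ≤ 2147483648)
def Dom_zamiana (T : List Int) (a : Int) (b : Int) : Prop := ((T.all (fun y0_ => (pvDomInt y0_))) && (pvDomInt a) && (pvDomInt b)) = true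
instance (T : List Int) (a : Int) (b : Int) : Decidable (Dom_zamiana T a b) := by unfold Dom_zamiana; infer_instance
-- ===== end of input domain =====

-- B computes the insertion boundary and rebuilds the result by slicing instead of A's destructive
-- element-shifting loops; equivalence is about the RETURN value (A mutates T in place, B does not).


-- ===== PORT A =====
-- `find`'s binary-search loop; `mid` is carried because Python reads it after the loop.
def pyFindLoop (T : List Int) (a : Int) (left right mid : Int) : Option Int :=
  if _h : left ≤ right then
    let m := left + PySem.Int.floordiv (right - left) 2
    match PySem.List.pyGet? T m with
    | none => none                                  -- IndexError (unreachable when T is nonempty)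
    | some v =>
      if v = a then some m
      else if v < a then pyFindLoop T a (m + 1) right m
      else pyFindLoop T a left (m - 1) m
  else
    match PySem.List.pyGet? T mid with
    | none => none
    | some v => if v > a then some (mid - 1) else some mid
termination_by (right + 1 - left).toNat
decreasing_by
  · have h2 : PySem.Int.floordiv (right - left) 2 = (right - left) / 2 :=
      PySem.Int.floordiv_eq_ediv_of_pos (by omega)
    simp only [h2]; omega
  · have h2 : PySem.Int.floordiv (right - left) 2 = (right - left) / 2 :=
      PySem.Int.floordiv_eq_ediv_of_pos (by omega)
    simp only [h2]; omega

-- Python's `find`; the initial `mid := 0` is never read: the loop body runs at least once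
-- whenever the `T[0]` access above it succeeded.
def pyFind (T : List Int) (a : Int) : Option Int :=
  match PySem.List.pyGet? T 0 with
  | none => none                                    -- IndexError on empty T
  | some t0 => if a < t0 then some 0 else pyFindLoop T a 0 ((T.length : Int) - 1) 0

-- `while i>0 and T[i-1]>b: T[i]=T[i-1]; i-=1`  then `T[i]=b`  (the a>b branch)
def shiftDown (T : List Int) (b : Int) (i : Int) : Option (List Int) :=
  if _h : 0 < i then
    match PySem.List.pyGet? T (i - 1) with
    | none => none
    | some p =>
      if p > b then
        match PySem.List.pySet? T i p with
        | none => none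
        | some T' => shiftDown T' b (i - 1)
      else PySem.List.pySet? T i b
  else PySem.List.pySet? T i b
termination_by i.toNat
decreasing_by omega

-- `while i<n-1 and T[i+1]<b: T[i]=T[i+1]; i+=1`  then `T[i]=b`  (the else branch)
def shiftUp (T : List Int) (b : Int) (n : Int) (i : Int) : Option (List Int) :=
  if _h : i < n - 1 then
    match PySem.List.pyGet? T (i + 1) with
    | none => none
    | some p =>
      if p < b then
        match PySem.List.pySet? T i p with
        | none => none
        | some T' => shiftUp T' b n (i + 1)
      else PySem.List.pySet? T i b
  else PySem.List.pySet? T i b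
termination_by (n - 1 - i).toNat
decreasing_by omega

def zamiana (T : List Int) (a : Int) (b : Int) : List Int :=
  let n : Int := T.length
  if a > b then
    match pyFind T a with
    | none => []                                    -- unreachable under Pre_ (IndexError on empty T)
    | some i => (shiftDown T b i).getD []
  else
    match pyFind T a with
    | none => []
    | some i => (shiftUp T b n i).getD []

-- ===== PORT B =====
-- Source B reuses A's `find` verbatim, so its port is the shared `pyFind` above.
-- `next((p for p in range(i, 0, -1) if T[p-1] <= b), 0)`; every index read is 0 ≤ p-1 < i < len T,
-- so the total `getD _ 0` is exact here.
def scanDown (T : List Int) (b : Int) : Nat → Nat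
  | 0 => 0
  | p + 1 => if T.getD p 0 ≤ b then p + 1 else scanDown T b p

-- `next((p for p in range(i, len(T)-1) if T[p+1] >= b), len(T)-1)`; reads T[p+1] with p+1 < len T.
def scanUp (T : List Int) (b : Int) (p : Nat) : Nat :=
  if _h : p + 1 < T.length then
    if b ≤ T.getD (p + 1) 0 then p else scanUp T b (p + 1)
  else T.length - 1
termination_by T.length - p

-- Slices with 0 ≤ lo ≤ hi ≤ len are exactly take/drop: T[:j] = take j, T[j:i] = (drop j).take (i-j),
-- T[i+1:] = drop (i+1).  pyFind provably returns 0 ≤ i < len T, so `.toNat` is exact here.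
def zamiana_alt (T : List Int) (a : Int) (b : Int) : List Int :=
  match pyFind T a with
  | none => []                                      -- unreachable under Pre_ (IndexError on empty T)
  | some ii =>
    let i := ii.toNat
    if a > b then
      let j := scanDown T b i
      T.take j ++ b :: ((T.drop j).take (i - j) ++ T.drop (i + 1))
    else
      let j := scanUp T b i
      T.take i ++ ((T.drop (i + 1)).take (j - i) ++ b :: T.drop (j + 1))

-- ===== PRECONDITION & SPEC =====
-- Pre_ excludes exactly the empty list, on which A's `find` raises IndexError at `T[0]`
-- (B calls the same `find` and raises there too).
def Pre_zamiana (T : List Int) (a : Int) (b : Int) : Prop := T ≠ []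
instance (T : List Int) (a : Int) (b : Int) : Decidable (Pre_zamiana T a b) := by
  unfold Pre_zamiana; infer_instance

def pvWitness_zamiana : List Int × Int × Int := ([4, 1, 3, 3], 3, 5)

def Spec_zamiana (T : List Int) (a : Int) (b : Int) (out : List Int) : Prop := out = zamiana_alt T a b
instance (T : List Int) (a : Int) (b : Int) (out : List Int) : Decidable (Spec_zamiana T a b out) := by unfold Spec_zamiana; infer_instance

-- ===== CLAIM (what is proved, stated in full; the proofs are below) =====
def Claim_equal_zamiana : Prop := ∀ (T : List Int) (a : Int) (b : Int), Dom_zamiana T a b → Pre_zamiana T a b → Spec_zamiana T a b (zamiana T a b)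

-- ===== LEMMAS AND PROOFS =====

theorem getD_in (T : List Int) (k : Nat) (hk : k < T.length) : T.getD k 0 = T[k] := by
  simp [List.getD_eq_getElem?_getD, List.getElem?_eq_getElem, hk]

-- `find` always lands on an index 0 ≤ i < len T (for nonempty T); no sortedness needed.
theorem pyFindLoop_bounds (T : List Int) (a : Int) (hT0 : T.getD 0 0 ≤ a) :
    ∀ fuel : Nat, ∀ left right mid : Int, (right + 1 - left).toNat ≤ fuel →
    0 ≤ left → right ≤ (T.length : Int) - 1 →
    (left ≤ right ∨ (0 ≤ mid ∧ mid ≤ (T.length : Int) - 1)) →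
    ∃ i : Nat, pyFindLoop T a left right mid = some (i : Int) ∧ i < T.length := by
  have exit : ∀ left right mid : Int, ¬ left ≤ right →
      0 ≤ mid → mid ≤ (T.length : Int) - 1 →
      ∃ i : Nat, pyFindLoop T a left right mid = some (i : Int) ∧ i < T.length := by
    intro left right mid hnot hm0 hm1
    have hmlen : mid.toNat < T.length := by omega
    rw [pyFindLoop.eq_def]
    simp only [hnot, dite_false]
    rw [show mid = ((mid.toNat : Nat) : Int) by omega, PySem.List.pyGet?_ofNat (h := hmlen)]
    by_cases hgt : T[mid.toNat] > a
    · have hmid1 : 1 ≤ mid := by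
        rcases Int.lt_or_le 0 mid with h | h
        · omega
        · exfalso
          have h00 : mid.toNat = 0 := by omega
          have hg : T.getD 0 0 > a := by
            rw [← h00, getD_in T mid.toNat hmlen]; exact hgt
          omega
      refine ⟨(mid - 1).toNat, ?_, by omega⟩
      simp only [hgt, if_true]
      congr 1; omega
    · refine ⟨mid.toNat, ?_, hmlen⟩
      simp only [hgt, if_false]
  intro fuel
  induction fuel with
  | zero =>
    intro left right mid hf hL hR hdisj
    rcases hdisj with h | ⟨hm0, hm1⟩
    · omega
    · exact exit left right mid (by omega) hm0 hm1
  | succ f ih =>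
    intro left right mid hf hL hR hdisj
    by_cases hlr : left ≤ right
    · have hdiv : PySem.Int.floordiv (right - left) 2 = (right - left) / 2 :=
        PySem.Int.floordiv_eq_ediv_of_pos (by omega)
      rw [pyFindLoop.eq_def]
      simp only [hlr, dite_true, hdiv]
      have hmb : left ≤ left + (right - left) / 2 ∧ left + (right - left) / 2 ≤ right := by omega
      set m : Int := left + (right - left) / 2 with hmdef
      have hmlen : m.toNat < T.length := by omega
      rw [show m = ((m.toNat : Nat) : Int) by omega, PySem.List.pyGet?_ofNat (h := hmlen)]
      by_cases heq : T[m.toNat] = a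
      · exact ⟨m.toNat, by simp [heq], hmlen⟩
      · simp only [heq, if_false]
        by_cases hlt : T[m.toNat] < a
        · simp only [hlt, if_true]
          rw [show ((m.toNat : Nat) : Int) = m by omega]
          exact ih (m+1) right m (by omega) (by omega) hR (by right; omega)
        · simp only [hlt, if_false]
          rw [show ((m.toNat : Nat) : Int) = m by omega]
          exact ih left (m-1) m (by omega) hL (by omega) (by right; omega)
    · rcases hdisj with h | ⟨hm0, hm1⟩
      · omega
      · exact exit left right mid hlr hm0 hm1

theorem pyFind_bounds (T : List Int) (a : Int) (h0 : 0 < T.length) :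
    ∃ i : Nat, pyFind T a = some (i : Int) ∧ i < T.length := by
  unfold pyFind
  rw [show (0:Int) = ((0:Nat) : Int) by simp, PySem.List.pyGet?_ofNat (h := h0)]
  by_cases hlt : a < T[0]
  · exact ⟨0, by simp [hlt], h0⟩
  · simp only [hlt, if_false]
    have hT0 : T.getD 0 0 ≤ a := by rw [getD_in T 0 h0]; omega
    exact pyFindLoop_bounds T a hT0 T.length 0 ((T.length : Int) - 1) 0
      (by omega) (by omega) (by omega) (by left; omega)

theorem scanDown_le (T : List Int) (b : Int) (i : Nat) : scanDown T b i ≤ i := by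
  induction i with
  | zero => simp [scanDown]
  | succ p ih =>
    rw [scanDown]
    split_ifs
    · omega
    · omega

theorem scanDown_congr (b : Int) (i : Nat) : ∀ T₁ T₂ : List Int,
    (∀ q : Nat, q < i → T₁.getD q 0 = T₂.getD q 0) →
    scanDown T₁ b i = scanDown T₂ b i := by
  induction i with
  | zero => intro _ _ _; rfl
  | succ p ih =>
    intro T₁ T₂ h
    rw [scanDown, scanDown, h p (by omega)]
    split_ifs
    · rfl
    · exact ih T₁ T₂ (fun q hq => h q (by omega))

theorem getD_set_eq' (T : List Int) (n j : Nat) (v : Int) :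
    (T.set n v).getD j 0 = if j = n ∧ j < T.length then v else T.getD j 0 := by
  simp only [List.getD_eq_getElem?_getD, List.getElem?_set]
  split_ifs with h1 h2 h3 h4 <;> simp_all <;> omega

theorem set_take_succ (l : List Int) (i : Nat) (v : Int) (h : i < l.length) :
    (l.set i v).take (i+1) = l.take i ++ [v] := by
  rw [List.take_add_one]
  simp [List.getElem?_set, h, List.take_set_of_le (le_refl i)]

theorem set_drop_self (l : List Int) (n : Nat) (v : Int) (h : n < l.length) :
    (l.set n v).drop n = v :: l.drop (n+1) := by
  rw [List.drop_eq_getElem_cons (by simp [h])]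
  simp [List.getElem_set, List.drop_set_of_lt (by omega : n < n+1)]

theorem shiftDown_closed (b : Int) (i : Nat) : ∀ T : List Int, i < T.length →
    shiftDown T b (i : Int) =
      some (T.take (scanDown T b i) ++ b ::
        ((T.drop (scanDown T b i)).take (i - scanDown T b i) ++ T.drop (i + 1))) := by
  induction i with
  | zero =>
    intro T hi
    rw [shiftDown.eq_def]
    simp only [Nat.cast_zero, lt_irrefl, dite_false]
    rw [show ((0:Int)) = ((0:Nat) : Int) by simp, PySem.List.pySet?_natCast (h := hi)]
    rw [List.set_eq_take_cons_drop b hi]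
    simp [scanDown]
  | succ i ih =>
    intro T hi
    have hi' : i < T.length := by omega
    rw [shiftDown.eq_def]
    simp only [show (0:Int) < ((i+1 : Nat) : Int) by push_cast; omega, dite_true]
    rw [show ((i+1 : Nat) : Int) - 1 = ((i : Nat) : Int) by push_cast; omega]
    rw [PySem.List.pyGet?_ofNat (h := hi')]
    have hscan : scanDown T b (i+1) = if T.getD i 0 ≤ b then i + 1 else scanDown T b i := rfl
    by_cases hgt : T[i] > b
    · simp only [hgt, if_true]
      rw [PySem.List.pySet?_natCast (h := hi)]
      show shiftDown (T.set (i+1) T[i]) b ((i : Nat) : Int) = _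
      rw [ih (T.set (i+1) T[i]) (by simp; omega)]
      have hj1 : scanDown (T.set (i+1) T[i]) b i = scanDown T b i := by
        apply scanDown_congr
        intro q hq
        rw [getD_set_eq']
        simp only [show ¬(q = i+1 ∧ q < T.length) by omega, if_false]
      have hj2 : scanDown T b (i+1) = scanDown T b i := by
        rw [hscan, if_neg (by rw [getD_in T i hi']; omega)]
      set j := scanDown T b i with hjdef
      have hj : j ≤ i := scanDown_le T b i
      rw [hj1, hj2]
      congr 1
      rw [List.take_set_of_le (by omega : j ≤ i + 1)]
      rw [List.drop_set (i := j), if_neg (by omega), List.take_set_of_le (by omega : i - j ≤ i + 1 - j)]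
      rw [set_drop_self T (i+1) T[i] hi]
      have hr : (T.drop j).take (i + 1 - j) = (T.drop j).take (i - j) ++ [T[i]] := by
        rw [show i + 1 - j = (i - j) + 1 by omega, List.take_add_one]
        congr 1
        rw [List.getElem?_drop, show j + (i - j) = i by omega,
            List.getElem?_eq_getElem hi']
        rfl
      rw [hr]
      simp
    · simp only [hgt, if_false]
      rw [PySem.List.pySet?_natCast (h := hi)]
      rw [List.set_eq_take_cons_drop b hi]
      have : scanDown T b (i+1) = i + 1 := by
        rw [hscan, if_pos (by rw [getD_in T i hi']; omega)]
      rw [this]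
      simp

theorem scanUp_ge (T : List Int) (b : Int) : ∀ d p : Nat, d = T.length - p → p < T.length →
    p ≤ scanUp T b p ∧ scanUp T b p ≤ T.length - 1 := by
  intro d
  induction d with
  | zero => intro p hd hp; omega
  | succ d ih =>
    intro p hd hp
    rw [scanUp]
    split_ifs with h1 h2
    · omega
    · have := ih (p+1) (by omega) (by omega)
      omega
    · omega

theorem scanUp_congr (b : Int) : ∀ d : Nat, ∀ T₁ T₂ : List Int, ∀ p : Nat, d = T₁.length - p →
    T₁.length = T₂.length →
    (∀ q : Nat, p < q → q < T₁.length → T₁.getD q 0 = T₂.getD q 0) →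
    scanUp T₁ b p = scanUp T₂ b p := by
  intro d
  induction d with
  | zero =>
    intro T₁ T₂ p hd hlen hq
    rw [scanUp]
    conv_rhs => rw [scanUp]
    simp only [show ¬(p + 1 < T₁.length) by omega, show ¬(p + 1 < T₂.length) by omega,
      dite_false, hlen]
  | succ d ih =>
    intro T₁ T₂ p hd hlen hq
    rw [scanUp]
    conv_rhs => rw [scanUp]
    by_cases h1 : p + 1 < T₁.length
    · simp only [h1, show p + 1 < T₂.length by omega, dite_true,
        hq (p+1) (by omega) (by omega)]
      split_ifs
      · rfl
      · exact ih T₁ T₂ (p+1) (by omega) hlen (fun q hq' hql => hq q (by omega) hql)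
    · simp only [h1, show ¬(p + 1 < T₂.length) by omega, dite_false, hlen]

theorem shiftUp_closed (b : Int) : ∀ d : Nat, ∀ T : List Int, ∀ i : Nat, d = T.length - i →
    i < T.length →
    shiftUp T b (T.length : Int) (i : Int) =
      some (T.take i ++ ((T.drop (i + 1)).take (scanUp T b i - i) ++ b ::
        T.drop (scanUp T b i + 1))) := by
  intro d
  induction d with
  | zero => intro T i hd hi; omega
  | succ d ih =>
    intro T i hd hi
    rw [shiftUp.eq_def]
    by_cases hc1 : i + 1 < T.length
    · simp only [show ((i:Nat) : Int) < (T.length : Int) - 1 by push_cast; omega, dite_true]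
      rw [show ((i:Nat) : Int) + 1 = ((i+1 : Nat) : Int) by push_cast; omega]
      rw [PySem.List.pyGet?_ofNat (h := hc1)]
      have hscan : scanUp T b i =
          if _h : i + 1 < T.length then (if b ≤ T.getD (i+1) 0 then i else scanUp T b (i+1))
          else T.length - 1 := by rw [scanUp]
      by_cases hlt : T[i+1] < b
      · simp only [hlt, if_true]
        rw [PySem.List.pySet?_natCast (h := hi)]
        show shiftUp (T.set i T[i+1]) b ((T.length : Int)) (((i:Nat) : Int) + 1) = _
        have hlen : (T.set i T[i+1]).length = T.length := by simp
        rw [show ((i:Nat) : Int) + 1 = ((i+1 : Nat) : Int) by push_cast; omega,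
            show ((T.length : Nat) : Int) = (((T.set i T[i+1]).length : Nat) : Int) by simp]
        rw [ih (T.set i T[i+1]) (i+1) (by simp; omega) (by simp; omega)]
        have hj1 : scanUp (T.set i T[i+1]) b (i+1) = scanUp T b (i+1) := by
          apply scanUp_congr b (T.length - (i+1)) _ _ (i+1) (by simp) (by simp)
          intro q hq hql
          rw [getD_set_eq']
          simp only [show ¬(q = i ∧ q < T.length) by omega, if_false]
        have hj2 : scanUp T b i = scanUp T b (i+1) := by
          have h' : ¬ b ≤ T.getD (i+1) 0 := by rw [getD_in T (i+1) hc1]; omega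
          rw [hscan, dif_pos hc1, if_neg h']
        obtain ⟨hjlo, hjhi⟩ := scanUp_ge T b (T.length - (i+1)) (i+1) rfl hc1
        set j := scanUp T b (i+1) with hjdef
        rw [hj1, hj2]
        congr 1
        rw [set_take_succ T i T[i+1] hi]
        rw [List.drop_set (i := i+2), if_pos (by omega)]
        rw [List.drop_set (i := j+1), if_pos (by omega)]
        have hr : (T.drop (i+1)).take (j - i) = T[i+1] :: (T.drop (i+2)).take (j - (i+1)) := by
          rw [← List.getElem_cons_drop (as := T) (i := i+1) hc1]
          rw [show j - i = (j - (i+1)) + 1 by omega]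
          rfl
        rw [hr]
        simp
      · simp only [hlt, if_false]
        rw [PySem.List.pySet?_natCast (h := hi)]
        rw [List.set_eq_take_cons_drop b hi]
        have : scanUp T b i = i := by
          have h' : b ≤ T.getD (i+1) 0 := by rw [getD_in T (i+1) hc1]; omega
          rw [hscan, dif_pos hc1, if_pos h']
        rw [this]
        simp
    · simp only [show ¬(((i:Nat) : Int) < (T.length : Int) - 1) by push_cast; omega, dite_false]
      rw [PySem.List.pySet?_natCast (h := hi)]
      rw [List.set_eq_take_cons_drop b hi]
      have : scanUp T b i = T.length - 1 := by
        rw [scanUp]; simp only [hc1, dite_false]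
      rw [this]
      simp only [show T.length - 1 - i = 0 by omega, List.take_zero, List.nil_append,
        show T.length - 1 + 1 = i + 1 by omega]

-- ===== VERDICT (by name: the statement is the Claim_ definition above) =====
theorem zamiana_spec : Claim_equal_zamiana := by
  intro T a b _hdom hpre
  have h0 : 0 < T.length := List.length_pos_of_ne_nil hpre
  obtain ⟨i, hfind, hilen⟩ := pyFind_bounds T a h0
  unfold Spec_zamiana zamiana zamiana_alt
  rw [hfind]
  by_cases hab : a > b
  · simp only [hab, if_true, Int.toNat_natCast]
    rw [shiftDown_closed b i T hilen]
    rfl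
  · simp only [hab, if_false, Int.toNat_natCast]
    rw [shiftUp_closed b (T.length - i) T i rfl hilen]
    rfl
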